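-- pv_equiv track=rewrite | github.com/bonlaw859/python_projects | gerrymandering.py | process_state_details
-- ===== SOURCE A (Python) =====
-- def process_state_details(details):
--     data = details[1:]
--     x = 1
--     dem_votes = 0
--     rep_votes = 0
--     dem_list = []
--     rep_list = []
--     for item in data:
--         if x == 2:
--             item = int(item)
--             dem_votes = dem_votes + item
--             dem_list.append(item)
--         if x == 3:
--             item = int(item)
--             rep_votes = rep_votes + item
--             rep_list.append(item)
--         x = x+1
--         if x ==4:
--             x = 1
--     return dem_votes, rep_votes, dem_list, rep_list
-- ===== SOURCE B (Python) =====
-- def process_state_details(details):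
--     data = details[1:]
--     dem_list = []
--     rep_list = []
--     for i in range(0, len(data), 3):
--         chunk = data[i:i+3]
--         if len(chunk) >= 2:
--             dem_list.append(int(chunk[1]))
--         if len(chunk) >= 3:
--             rep_list.append(int(chunk[2]))
--     return sum(dem_list), sum(rep_list), dem_list, rep_list
-- ===== Notes on version B (the rewrite author's own statement) =====
-- stated objective: simpler
-- what changed: Replaces the modular counter state machine with running vote totals by explicit 3-element chunked grouping that collects the two lists and sums them at the end.
import Mathlib
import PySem

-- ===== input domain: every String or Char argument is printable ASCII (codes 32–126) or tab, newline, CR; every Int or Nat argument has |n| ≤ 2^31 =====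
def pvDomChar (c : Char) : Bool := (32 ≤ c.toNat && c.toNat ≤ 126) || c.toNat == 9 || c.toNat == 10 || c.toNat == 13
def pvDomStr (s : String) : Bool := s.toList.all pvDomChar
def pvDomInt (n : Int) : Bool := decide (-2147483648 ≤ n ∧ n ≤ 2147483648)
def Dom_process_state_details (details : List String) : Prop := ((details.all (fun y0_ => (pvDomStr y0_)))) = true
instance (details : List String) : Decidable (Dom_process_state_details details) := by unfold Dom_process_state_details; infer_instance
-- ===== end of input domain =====

-- B replaces A's modular counter state machine with explicit 3-element chunked grouping (simpler decomposition, same O(n) cost).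


-- ===== PORT A =====
-- A's loop body: one step of the x-counter state machine; int(item) is Int.ofStr? (getD 0 is
-- unreachable under Pre_, which excludes exactly the ValueError inputs).
def pvStepA (st : Int × Int × Int × List Int × List Int) (item : String) :
    Int × Int × Int × List Int × List Int :=
  let (x, dv, rv, dl, rl) := st
  let (dv, dl) :=
    if x == 2 then
      let v := (PySem.Int.ofStr? item).getD 0
      (dv + v, dl ++ [v])
    else (dv, dl)
  let (rv, rl) :=
    if x == 3 then
      let v := (PySem.Int.ofStr? item).getD 0
      (rv + v, rl ++ [v])
    else (rv, rl)
  let x := x + 1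
  let x := if x == 4 then 1 else x
  (x, dv, rv, dl, rl)

def process_state_details (details : List String) : Int × Int × List Int × List Int :=
  let data := PySem.List.slice details (some 1) none
  let st := data.foldl pvStepA (1, 0, 0, [], [])
  (st.2.1, st.2.2.1, st.2.2.2.1, st.2.2.2.2)

-- ===== PORT B =====
-- B's chunk loop: each 3-chunk contributes chunk[1] to dem_list (if present) and chunk[2] to
-- rep_list (if present); the pattern match is exactly the chunk-length tests of Source B.
def pvChunksB : List String → List Int × List Int
  | [] => ([], [])
  | [_] => ([], [])
  | [_, b] => ([(PySem.Int.ofStr? b).getD 0], [])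
  | _ :: b :: c :: rest =>
    ((PySem.Int.ofStr? b).getD 0 :: (pvChunksB rest).1,
     (PySem.Int.ofStr? c).getD 0 :: (pvChunksB rest).2)

def process_state_details_alt (details : List String) : Int × Int × List Int × List Int :=
  let data := PySem.List.slice details (some 1) none
  let (dl, rl) := pvChunksB data
  (dl.sum, rl.sum, dl, rl)

-- ===== PRECONDITION & SPEC =====
-- Pre_ excludes exactly the inputs on which A raises ValueError: a non-int string at a
-- dem/rep position (index ≢ 0 mod 3 of details[1:]).
def Pre_process_state_details (details : List String) : Prop :=
  ∀ i : Nat, i < (details.drop 1).length → i % 3 ≠ 0 →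
    (PySem.Int.ofStr? ((details.drop 1).getD i "")).isSome = true
instance (details : List String) : Decidable (Pre_process_state_details details) := by
  unfold Pre_process_state_details; infer_instance
def pvWitness_process_state_details : List String := ["NY", "skip", "12", "34"]

def Spec_process_state_details (details : List String) (out : Int × Int × List Int × List Int) : Prop := out = process_state_details_alt details
instance (details : List String) (out : Int × Int × List Int × List Int) : Decidable (Spec_process_state_details details out) := by unfold Spec_process_state_details; infer_instance

-- ===== CLAIM (what is proved, stated in full; the proofs are below) =====
def Claim_equal_process_state_details : Prop := ∀ (details : List String), Dom_process_state_details details → Pre_process_state_details details → Spec_process_state_details details (process_state_details details)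

-- ===== LEMMAS AND PROOFS =====

-- The key invariant: A's fold from x = 1 appends exactly B's chunk lists and adds their sums.
theorem pvFoldA_eq (data : List String) :
    ∀ dv rv dl rl, data.foldl pvStepA (1, dv, rv, dl, rl) =
      ((data.foldl pvStepA (1, dv, rv, dl, rl)).1,
        dv + (pvChunksB data).1.sum, rv + (pvChunksB data).2.sum,
        dl ++ (pvChunksB data).1, rl ++ (pvChunksB data).2) := by
  induction data using pvChunksB.induct with
  | case1 => simp [pvChunksB]
  | case2 a => intro dv rv dl rl; simp [pvChunksB, pvStepA]
  | case3 a b => intro dv rv dl rl; simp [pvChunksB, pvStepA]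
  | case4 a b c rest ih =>
    intro dv rv dl rl
    simp only [List.foldl_cons, pvStepA]
    norm_num
    rw [ih]
    simp [pvChunksB, add_assoc, List.append_assoc]

-- ===== VERDICT (by name: the statement is the Claim_ definition above) =====
theorem process_state_details_spec : Claim_equal_process_state_details := by
  intro details _ _
  show _ = _
  unfold process_state_details process_state_details_alt
  simp only [PySem.List.slice_from_one]
  rw [pvFoldA_eq]
  cases h : pvChunksB details.tail with
  | mk dl rl => simp
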